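-- pv_equiv track=rewrite | github.com/yeastgenome/SGDBackend-Nex2 | scripts/dumping/alliance/dump_gff4alliance.py | get_phase
-- ===== SOURCE A (Python) =====
-- def get_phase(subfeatures, strand):
--
--     if strand == '-':
--         subfeatures.reverse()
--
--     length = 0
--     start2phase = {}
--     for (display_name, contig_start_index, contig_end_index) in subfeatures:
--         if display_name != 'CDS':
--             continue
--         phase = length % 3
--         if phase != 0:
--             phase = 3 - phase
--         start2phase[contig_start_index] = phase
--         length += contig_end_index - contig_start_index + 1
--
--     return start2phase
-- ===== SOURCE B (Python) =====
-- def get_phase(subfeatures, strand):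
--     # Mutates subfeatures in place on '-' strand, exactly like the original.
--     if strand == '-':
--         subfeatures.reverse()
--
--     # Build the (start, phase) pairs back-to-front: no running length is kept.
--     # A CDS itself always starts at phase 0 relative to the features after it;
--     # prepending a CDS of length l shifts every later phase by -l (mod 3).
--     res = []
--     for (name, s, e) in reversed(subfeatures):
--         if name == 'CDS':
--             l = e - s + 1
--             res = [(s, 0)] + [(t, (p - l) % 3) for (t, p) in res]
--
--     return dict(res)
-- ===== Notes on version B (the rewrite author's own statement) =====
-- stated objective: alternative
-- what changed: A's forward pass with a running cumulative length and an in-place dict is replaced by a back-to-front construction with no accumulator: each CDS starts at phase 0 and, when prepended, shifts every already-computed later phase by minus its length mod 3; the resulting pair list is turned into a dict at the end.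
import Mathlib
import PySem

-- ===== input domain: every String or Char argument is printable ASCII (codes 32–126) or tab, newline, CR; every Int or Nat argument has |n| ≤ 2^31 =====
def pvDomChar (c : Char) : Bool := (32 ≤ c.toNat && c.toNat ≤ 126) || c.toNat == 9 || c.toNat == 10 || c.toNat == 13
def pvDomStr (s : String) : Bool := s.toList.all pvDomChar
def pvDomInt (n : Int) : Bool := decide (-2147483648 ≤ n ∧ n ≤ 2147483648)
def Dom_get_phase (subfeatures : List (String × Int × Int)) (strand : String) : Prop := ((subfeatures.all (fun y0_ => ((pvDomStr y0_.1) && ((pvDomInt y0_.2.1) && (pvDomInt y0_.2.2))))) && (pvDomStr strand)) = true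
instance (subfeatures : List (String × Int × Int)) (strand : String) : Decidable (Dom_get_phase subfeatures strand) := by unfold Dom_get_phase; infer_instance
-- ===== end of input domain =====

-- B drops A's running-length accumulator: it builds the (start, phase) pairs back-to-front,
-- each CDS starting at phase 0 and shifting all later phases by its length (objective: alternative, same result).
-- Python A mutates `subfeatures` in place (reverse on '-' strand); B performs the same mutation; the theorems are about the return value.

-- ===== PORT A =====
def get_phase (subfeatures : List (String × Int × Int)) (strand : String) : List (Int × Int) :=
  let subs := if strand == "-" then subfeatures.reverse else subfeatures
  let st := subs.foldl
    (fun (st : Int × PySem.Dict Int Int) t =>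
      if t.1 != "CDS" then st
      else
        let phase := PySem.Int.mod st.1 3
        let phase := if phase != 0 then 3 - phase else phase
        (st.1 + (t.2.2 - t.2.1 + 1), st.2.insert t.2.1 phase))
    (0, PySem.Dict.empty)
  st.2.items

-- ===== PORT B =====
-- `for … in reversed(subfeatures)` rebuilding `res` each step is a right fold over subs.
def get_phase_alt (subfeatures : List (String × Int × Int)) (strand : String) : List (Int × Int) :=
  let subs := if strand == "-" then subfeatures.reverse else subfeatures
  let pairs := subs.foldr
    (fun t (res : List (Int × Int)) =>
      if t.1 == "CDS" then
        (t.2.1, (0 : Int)) ::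
          res.map (fun q => (q.1, PySem.Int.mod (q.2 - (t.2.2 - t.2.1 + 1)) 3))
      else res) []
  (pairs.foldl (fun (d : PySem.Dict Int Int) p => d.insert p.1 p.2) PySem.Dict.empty).items

-- ===== PRECONDITION & SPEC =====
def Spec_get_phase (subfeatures : List (String × Int × Int)) (strand : String) (out : List (Int × Int)) : Prop := out = get_phase_alt subfeatures strand
instance (subfeatures : List (String × Int × Int)) (strand : String) (out : List (Int × Int)) : Decidable (Spec_get_phase subfeatures strand out) := by unfold Spec_get_phase; infer_instance

-- ===== CLAIM (what is proved, stated in full; the proofs are below) =====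
def Claim_equal_get_phase : Prop := ∀ (subfeatures : List (String × Int × Int)) (strand : String), Dom_get_phase subfeatures strand → Spec_get_phase subfeatures strand (get_phase subfeatures strand)

-- ===== LEMMAS AND PROOFS =====

-- the (start, (-cumulative length) % 3) pairs of the CDS entries, starting from length L
def pvPairs : List (String × Int × Int) → Int → List (Int × Int)
  | [], _ => []
  | t :: xs, L =>
      if t.1 == "CDS" then (t.2.1, PySem.Int.mod (-L) 3) :: pvPairs xs (L + (t.2.2 - t.2.1 + 1))
      else pvPairs xs L

-- A's phase arithmetic is (-L) % 3
theorem pvPhaseEq (L : Int) :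
    (if (!(PySem.Int.mod L 3 == 0)) = true then 3 - PySem.Int.mod L 3 else PySem.Int.mod L 3)
      = PySem.Int.mod (-L) 3 := by
  simp only [PySem.Int.mod_eq_emod_of_pos (by norm_num : (0:Int) < 3)]
  by_cases h : L % 3 = 0 <;> simp [h] <;> omega

-- A's loop builds the dict of pvPairs, in order
theorem pvFoldA (xs : List (String × Int × Int)) (L : Int) (d : PySem.Dict Int Int) :
    (xs.foldl
      (fun (st : Int × PySem.Dict Int Int) t =>
        if t.1 != "CDS" then st
        else
          let phase := PySem.Int.mod st.1 3
          let phase := if phase != 0 then 3 - phase else phase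
          (st.1 + (t.2.2 - t.2.1 + 1), st.2.insert t.2.1 phase)) (L, d)).2
    = (pvPairs xs L).foldl (fun (d : PySem.Dict Int Int) p => d.insert p.1 p.2) d := by
  induction xs generalizing L d with
  | nil => rfl
  | cons x xs ih =>
      cases h : x.1 == "CDS"
      · simp only [List.foldl_cons, pvPairs, h, bne, Bool.not_false, reduceIte]
        exact ih _ _
      · simp only [List.foldl_cons, pvPairs, h, bne, Bool.not_true, reduceIte, pvPhaseEq]
        exact ih _ _

-- shifting every phase of pvPairs by -l (mod 3) advances the starting length by l
theorem pvPairsShift (xs : List (String × Int × Int)) (L l : Int) :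
    (pvPairs xs L).map (fun q => (q.1, PySem.Int.mod (q.2 - l) 3)) = pvPairs xs (L + l) := by
  induction xs generalizing L with
  | nil => rfl
  | cons x xs ih =>
      cases h : x.1 == "CDS"
      · simp only [pvPairs, h]; exact ih _
      · simp only [pvPairs, h, reduceIte, List.map_cons, ih]
        have h1 : PySem.Int.mod (PySem.Int.mod (-L) 3 - l) 3 = PySem.Int.mod (-(L + l)) 3 := by
          simp only [PySem.Int.mod_eq_emod_of_pos (by norm_num : (0:Int) < 3)]
          omega
        have h2 : L + (x.2.2 - x.2.1 + 1) + l = L + l + (x.2.2 - x.2.1 + 1) := by ring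
        rw [h1, h2]

-- B's back-to-front construction produces exactly pvPairs from length 0
theorem pvFoldB (xs : List (String × Int × Int)) :
    xs.foldr
      (fun t (res : List (Int × Int)) =>
        if t.1 == "CDS" then
          (t.2.1, (0 : Int)) ::
            res.map (fun q => (q.1, PySem.Int.mod (q.2 - (t.2.2 - t.2.1 + 1)) 3))
        else res) []
    = pvPairs xs 0 := by
  induction xs with
  | nil => rfl
  | cons x xs ih =>
      simp only [List.foldr_cons, ih]
      cases h : x.1 == "CDS"
      · simp [pvPairs, h]
      · simp only [reduceIte]
        rw [pvPairsShift]
        simp only [pvPairs, h, reduceIte, zero_add, neg_zero]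
        norm_num [PySem.Int.mod_eq_emod_of_pos (by norm_num : (0:Int) < 3)]

-- ===== VERDICT (by name: the statement is the Claim_ definition above) =====
theorem get_phase_spec : Claim_equal_get_phase := by
  intro subfeatures strand _
  simp only [Spec_get_phase, get_phase, get_phase_alt]
  rw [pvFoldA, pvFoldB]
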